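/- GENERATED by farm/mkstatement.py from design/units.tsv (unit `pow`) and the Specs of Vorbis/Spec/*.lean — do not edit.
   THE STATEMENT of the proof unit `pow`: the function `pow` (38 instructions) satisfies its contract,
   given the contracts of its callees. What the names mean: Vorbis/Spec/Basic.lean. The theorem to prove:
   `theorem pow_ok : Vorbis.Spec.pow.Statement`. -/
import Vorbis.Spec.Libm
namespace Vorbis.Spec.pow
open X86 X86.User Asan

/-- The statement of unit `pow`. -/
def Statement : Prop :=
  ∀ (Lay : Layout) (_hLay : Lay.hi = 0x1000000) (μ : Microarch) (_hμ : UserX.MicroOK μ) (u₀ : State)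
    (_hcode : HasCodeNat Lay u₀ Vorbis.L.pow.entry Vorbis.Code.code_pow.nat Vorbis.L.pow.size)
    (_h_pow_int : ∀ (others : List Obj) (frames : List (Nat × FrameLayout)), Calls Lay μ Vorbis.WayInv (Vorbis.conv u₀) Vorbis.L.pow_int.entry (Vorbis.Spec.pow_int.spec others frames))
    (_h_log : ∀ (others : List Obj) (frames : List (Nat × FrameLayout)), Calls Lay μ Vorbis.WayInv (Vorbis.conv u₀) Vorbis.L.log.entry (Vorbis.Spec.log.spec others frames))
    (_h_exp : ∀ (others : List Obj) (frames : List (Nat × FrameLayout)), Calls Lay μ Vorbis.WayInv (Vorbis.conv u₀) Vorbis.L.exp.entry (Vorbis.Spec.exp.spec others frames)),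
    ∀ (others : List Obj) (frames : List (Nat × FrameLayout)), Calls Lay μ Vorbis.WayInv (Vorbis.conv u₀) Vorbis.L.pow.entry (Vorbis.Spec.pow.spec others frames)

end Vorbis.Spec.pow
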